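-- pv_equiv track=rewrite | github.com/nilomr/pykanto | src/greti/sequencing/seqfinder.py | collapse_palindromic_keys
-- ===== SOURCE A (Python) =====
-- def collapse_palindromic_keys(tally, seq_str):
--     # Take the one that appears first in sequence most often
--     remove = []
--     for k, v in tally.items():
--         if (k and k[::-1] in tally.keys()) and (k != k[::-1]):
--             how_many_first = {pattrn: sum(
--                 [seq.startswith(pattrn) for seq in seq_str]) for pattrn in [k, k[::-1]]}
--             minkey = min(how_many_first, key=lambda key: how_many_first[key])
--             remove.append(minkey)
--
--     no_palindromes = dict((k, tally[k])
--                           for k in tally.keys() if k not in set(remove))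
--     return no_palindromes
-- ===== SOURCE B (Python) =====
-- def collapse_palindromic_keys(tally, seq_str):
--     # Inverted traversal: build the qualifying-pattern set once, then ONE pass
--     # over the sequences slices each sequence at the distinct pattern lengths
--     # and bumps a hash counter -- the per-key scan of seq_str disappears.
--     pats = {k for k in tally if k and k != k[::-1] and k[::-1] in tally}
--     lens = {len(p) for p in pats}
--     cnt = dict.fromkeys(pats, 0)
--     for s in seq_str:
--         for L in lens:
--             if L <= len(s) and s[:L] in cnt:
--                 cnt[s[:L]] += 1
--     return {k: v for k, v in tally.items()
--             if k not in cnt or cnt[k] > cnt[k[::-1]]}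
-- ===== Notes on version B (the rewrite author's own statement) =====
-- stated objective: faster
-- what changed: Inverts the traversal: instead of scanning seq_str once per key with startswith, B builds the qualifying-pattern set and its distinct lengths once, then a single pass over the sequences slices each sequence at those lengths and bumps a hash counter, and a direct keep predicate count(k) > count(reversed k) replaces the remove-list with min() over a two-entry dict.
import Mathlib
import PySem

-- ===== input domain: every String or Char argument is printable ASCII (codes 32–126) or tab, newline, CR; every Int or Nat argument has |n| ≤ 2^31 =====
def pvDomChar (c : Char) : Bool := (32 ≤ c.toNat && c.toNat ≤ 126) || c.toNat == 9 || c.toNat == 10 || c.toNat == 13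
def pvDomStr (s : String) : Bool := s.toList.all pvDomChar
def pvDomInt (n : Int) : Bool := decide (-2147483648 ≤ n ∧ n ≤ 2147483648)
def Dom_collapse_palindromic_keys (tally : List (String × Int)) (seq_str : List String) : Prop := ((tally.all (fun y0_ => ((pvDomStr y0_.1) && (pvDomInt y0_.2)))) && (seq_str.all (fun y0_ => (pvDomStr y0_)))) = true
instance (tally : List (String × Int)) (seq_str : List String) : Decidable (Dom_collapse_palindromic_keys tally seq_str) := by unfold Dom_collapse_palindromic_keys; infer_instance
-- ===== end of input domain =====

-- B inverts A's traversal: instead of scanning seq_str once per key, it builds the set of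
-- qualifying patterns and their distinct lengths once and makes a SINGLE pass over the
-- sequences, slicing each sequence at those lengths and bumping a hash counter.

-- ===== PORT A =====
def pyRev (s : String) : String := (PySem.Str.slice? s none none (-1)).getD ""

-- sum([seq.startswith(pattrn) for seq in seq_str])
def cntA (seq_str : List String) (p : String) : Int :=
  (seq_str.map (fun seq => if PySem.Str.startswith seq p then (1 : Int) else 0)).sum

-- the dict comprehension {pattrn: …} over [k, k[::-1]] and min(…, key=…);
-- min over a nonempty dict's keys is always some, so the [] branch is unreachable
def minkeyA (seq_str : List String) (k : String) : List String :=
  let hm : PySem.Dict String Int :=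
    ([k, pyRev k]).foldl (fun h p => h.insert p (cntA seq_str p)) PySem.Dict.empty
  match PySem.List.min? hm.keys (fun key => hm.getD key 0) with
  | some m => [m]
  | none => []

def collapse_palindromic_keys (tally : List (String × Int)) (seq_str : List String) : List (String × Int) :=
  let d : PySem.Dict String Int := PySem.Dict.mk tally
  let remove : List String :=
    d.items.foldl (fun acc kv =>
      acc ++ (if kv.1 != "" && d.contains (pyRev kv.1) && kv.1 != pyRev kv.1
              then minkeyA seq_str kv.1 else [])) []
  let no_palindromes : PySem.Dict String Int :=
    d.keys.foldl (fun nd k =>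
      if PySem.Set.contains (PySem.Set.ofList remove) k then nd
      else match d.get? k with
           | some v => nd.insert k v
           | none => nd) PySem.Dict.empty
  no_palindromes.items

-- ===== PORT B =====
-- one inner step of B's counting loop: `if L <= len(s) and s[:L] in cnt: cnt[s[:L]] += 1`
def stepB (s : String) (c : PySem.Dict String Int) (L : Int) : PySem.Dict String Int :=
  if decide (L ≤ PySem.Str.len s) && c.contains (PySem.Str.slice s none (some L))
  then c.modify (PySem.Str.slice s none (some L)) 0 (· + 1) else c

def collapse_palindromic_keys_alt (tally : List (String × Int)) (seq_str : List String) : List (String × Int) :=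
  let d : PySem.Dict String Int := PySem.Dict.mk tally
  -- pats = {k for k in tally if k and k != k[::-1] and k[::-1] in tally}
  let pats : PySem.Set String :=
    PySem.Set.ofList (d.keys.filter (fun k => k != "" && k != pyRev k && d.contains (pyRev k)))
  -- lens = {len(p) for p in pats}
  let lens : PySem.Set Int := PySem.Set.ofList (pats.map (fun p => PySem.Str.len p))
  -- cnt = dict.fromkeys(pats, 0)
  let cnt0 : PySem.Dict String Int := pats.foldl (fun c p => c.insert p 0) PySem.Dict.empty
  let cnt : PySem.Dict String Int := seq_str.foldl (fun c s => lens.foldl (stepB s) c) cnt0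
  -- {k: v for k, v in tally.items() if k not in cnt or cnt[k] > cnt[k[::-1]]}
  -- (cnt[k[::-1]] read as getD 0: whenever k ∈ cnt its reverse is in cnt too, so the
  --  default is never used — Python's lookup never raises here)
  let res : PySem.Dict String Int :=
    d.items.foldl (fun nd kv =>
      if !cnt.contains kv.1 || decide (cnt.getD kv.1 0 > cnt.getD (pyRev kv.1) 0)
      then nd.insert kv.1 kv.2 else nd) PySem.Dict.empty
  res.items

-- ===== PRECONDITION & SPEC =====
-- Pre_ excludes association lists with duplicate keys: a Python dict cannot contain them,
-- so they represent no input A ever receives.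
def Pre_collapse_palindromic_keys (tally : List (String × Int)) (seq_str : List String) : Prop :=
  (tally.map Prod.fst).Nodup

instance (tally : List (String × Int)) (seq_str : List String) : Decidable (Pre_collapse_palindromic_keys tally seq_str) := by unfold Pre_collapse_palindromic_keys; infer_instance

def pvWitness_collapse_palindromic_keys : (List (String × Int)) × List String :=
  ([("ab", 2), ("ba", 1)], ["ab"])

def Spec_collapse_palindromic_keys (tally : List (String × Int)) (seq_str : List String) (out : List (String × Int)) : Prop := out = collapse_palindromic_keys_alt tally seq_str
instance (tally : List (String × Int)) (seq_str : List String) (out : List (String × Int)) : Decidable (Spec_collapse_palindromic_keys tally seq_str out) := by unfold Spec_collapse_palindromic_keys; infer_instance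

-- ===== CLAIM (what is proved, stated in full; the proofs are below) =====
def Claim_equal_collapse_palindromic_keys : Prop := ∀ (tally : List (String × Int)) (seq_str : List String), Dom_collapse_palindromic_keys tally seq_str → Pre_collapse_palindromic_keys tally seq_str → Spec_collapse_palindromic_keys tally seq_str (collapse_palindromic_keys tally seq_str)

-- ===== LEMMAS AND PROOFS =====
theorem pyRev_eq (s : String) : pyRev s = String.ofList s.toList.reverse := by
  simp [pyRev, PySem.Str.slice?_none_none_neg_one]

theorem pyRev_pyRev (s : String) : pyRev (pyRev s) = s := by
  simp [pyRev_eq, String.toList_ofList]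

theorem pyRev_ne_empty {s : String} (h : s ≠ "") : pyRev s ≠ "" := by
  rw [pyRev_eq]; intro hc; apply h
  have h2 := congrArg String.toList hc
  simp [String.toList_ofList] at h2
  exact (String.empty_eq_iff.mpr h2).symm

theorem minkeyA_eq (seq_str : List String) (k : String) (hk : k ≠ pyRev k) :
    minkeyA seq_str k =
      [if cntA seq_str k ≤ cntA seq_str (pyRev k) then k else pyRev k] := by
  unfold minkeyA
  simp only [List.foldl_cons, List.foldl_nil]
  have hkeys : ((PySem.Dict.empty.insert k (cntA seq_str k)).insert (pyRev k) (cntA seq_str (pyRev k))).keys = [k, pyRev k] := by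
    rw [PySem.Dict.keys_insert_of_not_contains, PySem.Dict.keys_insert_of_not_contains]
    · simp [PySem.Dict.keys_empty]
    · simp [PySem.Dict.contains_empty]
    · rw [PySem.Dict.contains_insert]
      simp [PySem.Dict.contains_empty]
      exact fun h => hk h.symm
  rw [hkeys]
  have h1 : ((PySem.Dict.empty.insert k (cntA seq_str k)).insert (pyRev k) (cntA seq_str (pyRev k))).getD k 0 = cntA seq_str k := by
    rw [PySem.Dict.getD_insert_of_ne _ _ _ hk, PySem.Dict.getD_insert_self]
  have h2 : ((PySem.Dict.empty.insert k (cntA seq_str k)).insert (pyRev k) (cntA seq_str (pyRev k))).getD (pyRev k) 0 = cntA seq_str (pyRev k) := by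
    rw [PySem.Dict.getD_insert_self]
  simp only [PySem.List.min?, List.foldl_cons, List.foldl_nil, h1, h2]
  split_ifs with ha hb hc <;> simp_all <;> omega

def condQ (d : PySem.Dict String Int) (k : String) : Bool :=
  k != "" && d.contains (pyRev k) && k != pyRev k

theorem condQ_iff (d : PySem.Dict String Int) (k : String) :
    condQ d k = true ↔ k ≠ "" ∧ d.contains (pyRev k) = true ∧ k ≠ pyRev k := by
  simp [condQ]; tauto

theorem foldl_if_skip {α β : Type} (l : List α) (p : α → Bool) (f : β → α → β) (init : β) :
    l.foldl (fun acc x => if p x then f acc x else acc) init = (l.filter p).foldl f init := by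
  induction l generalizing init with
  | nil => rfl
  | cons a t ih => by_cases h : p a <;> simp [h, ih]

-- the canonical keep predicate both results reduce to

def keepP (tally : List (String × Int)) (seq_str : List String) (kv : String × Int) : Bool :=
  !(condQ (PySem.Dict.mk tally) kv.1 && decide (cntA seq_str kv.1 ≤ cntA seq_str (pyRev kv.1)))

-- membership in A's remove list

theorem mem_remove_iff (tally : List (String × Int)) (seq_str : List String) (x : String) :
    (x ∈ List.flatMap (fun kv => if condQ (PySem.Dict.mk tally) kv.1 then minkeyA seq_str kv.1 else ([] : List String)) tally)
      ↔ (x ∈ tally.map Prod.fst ∧ condQ (PySem.Dict.mk tally) x = true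
          ∧ cntA seq_str x ≤ cntA seq_str (pyRev x)) := by
  have hck : ∀ y : String, (PySem.Dict.mk tally).contains y = true ↔ y ∈ tally.map Prod.fst := by
    intro y
    rw [PySem.Dict.contains_iff_mem_keys]
    rfl
  constructor
  · rw [List.mem_flatMap]
    rintro ⟨kv, hkv, hx⟩
    by_cases hq : condQ (PySem.Dict.mk tally) kv.1
    · obtain ⟨hne, hcont, hrev⟩ := (condQ_iff _ _).mp hq
      rw [if_pos hq, minkeyA_eq _ _ hrev, List.mem_singleton] at hx
      by_cases hle : cntA seq_str kv.1 ≤ cntA seq_str (pyRev kv.1)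
      · rw [if_pos hle] at hx
        subst hx
        exact ⟨List.mem_map_of_mem hkv, hq, hle⟩
      · rw [if_neg hle] at hx
        subst hx
        refine ⟨(hck _).mp hcont, ?_, ?_⟩
        · rw [condQ_iff]
          refine ⟨pyRev_ne_empty hne, ?_, ?_⟩
          · rw [pyRev_pyRev, hck]
            exact List.mem_map_of_mem hkv
          · rw [pyRev_pyRev]
            exact fun h => hrev h.symm
        · rw [pyRev_pyRev]
          omega
    · rw [if_neg hq] at hx
      simp at hx
  · rintro ⟨hmem, hq, hle⟩
    rw [List.mem_flatMap]
    obtain ⟨kv, hkv, hfst⟩ := List.mem_map.mp hmem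
    refine ⟨kv, hkv, ?_⟩
    rw [hfst, if_pos hq, minkeyA_eq _ _ ((condQ_iff _ _).mp hq).2.2, if_pos hle]
    exact List.mem_singleton.mpr rfl

theorem get?_of_mem_keys (d : PySem.Dict String Int) (hnd : d.keys.Nodup) {k : String}
    (h : k ∈ d.keys) : d.get? k = some (d.getD k 0) := by
  have : (k, d.getD k 0) ∈ d.items := by
    rw [PySem.Dict.items_eq_map_keys d hnd 0]
    exact List.mem_map_of_mem h
  exact PySem.Dict.get?_of_mem_items _ this hnd

theorem map_keys_filter (p : String → Bool) (tally : List (String × Int))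
    (hnd : (tally.map Prod.fst).Nodup) :
    ((tally.map Prod.fst).filter p).map (fun k => (k, (PySem.Dict.mk tally).getD k 0))
      = tally.filter (fun kv => p kv.1) := by
  induction tally with
  | nil => rfl
  | cons kv t ih =>
      simp only [List.map_cons, List.nodup_cons] at hnd ⊢
      have hhead : (PySem.Dict.mk (kv :: t)).getD kv.1 0 = kv.2 := by
        rw [PySem.Dict.getD_eq_get?_getD, PySem.Dict.get?_mk_cons]
        simp
      have htail : ∀ k ∈ (t.map Prod.fst).filter p,
          (fun k => (k, (PySem.Dict.mk (kv :: t)).getD k 0)) k = (fun k => (k, (PySem.Dict.mk t).getD k 0)) k := by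
        intro k hk
        have hmem : k ∈ t.map Prod.fst := List.mem_of_mem_filter hk
        have hne : kv.1 ≠ k := fun h => hnd.1 (h ▸ hmem)
        simp only [Prod.mk.injEq, true_and]
        rw [PySem.Dict.getD_eq_get?_getD, PySem.Dict.get?_mk_cons, PySem.Dict.getD_eq_get?_getD]
        simp [hne]
      by_cases hp : p kv.1 <;>
        simp only [List.filter_cons, hp, List.map_cons, ite_true, ite_false, if_true, if_false, Bool.false_eq_true, Bool.true_eq_false, if_neg, reduceIte] <;>
        rw [List.map_congr_left htail, ih hnd.2]
      simp [hhead]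

theorem A_eq_filter (tally : List (String × Int)) (seq_str : List String)
    (hpre : (tally.map Prod.fst).Nodup) :
    collapse_palindromic_keys tally seq_str
      = tally.filter (keepP tally seq_str) := by
  unfold collapse_palindromic_keys
  have hkeys : (PySem.Dict.mk tally).keys = tally.map Prod.fst := rfl
  have hnd : (PySem.Dict.mk tally).keys.Nodup := by rw [hkeys]; exact hpre
  simp only [PySem.List.foldl_append_eq_flatMap, List.nil_append]
  have hfun : (fun (x : String × Int) => if (x.1 != "" && (PySem.Dict.mk tally).contains (pyRev x.1) && x.1 != pyRev x.1) = true then minkeyA seq_str x.1 else ([] : List String)) = (fun kv => if condQ (PySem.Dict.mk tally) kv.1 = true then minkeyA seq_str kv.1 else ([] : List String)) := rfl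
  rw [hfun]
  have hcong : ∀ (acc : PySem.Dict String Int), ∀ k ∈ (PySem.Dict.mk tally).keys,
      (if PySem.Set.contains (PySem.Set.ofList (List.flatMap (fun kv => if condQ (PySem.Dict.mk tally) kv.1 then minkeyA seq_str kv.1 else ([] : List String)) tally)) k then acc
       else match (PySem.Dict.mk tally).get? k with
            | some v => acc.insert k v
            | none => acc)
      = (if !PySem.Set.contains (PySem.Set.ofList (List.flatMap (fun kv => if condQ (PySem.Dict.mk tally) kv.1 then minkeyA seq_str kv.1 else ([] : List String)) tally)) k
         then acc.insert k ((PySem.Dict.mk tally).getD k 0) else acc) := by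
    intro acc k hk
    rw [get?_of_mem_keys _ hnd hk]
    cases h : PySem.Set.contains (PySem.Set.ofList (List.flatMap (fun kv => if condQ (PySem.Dict.mk tally) kv.1 then minkeyA seq_str kv.1 else ([] : List String)) tally)) k <;> simp
  rw [PySem.List.foldl_congr_mem _ _ _ _ hcong, foldl_if_skip,
      PySem.Dict.items_foldl_insert_fresh _ (fun a => a) (fun a => (PySem.Dict.mk tally).getD a 0) _
        (by intro a _; exact PySem.Dict.contains_empty a)
        (by simpa using hnd.filter _)]
  simp only [show (PySem.Dict.empty : PySem.Dict String Int).items = [] from rfl, List.nil_append]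
  rw [hkeys, map_keys_filter _ _ hpre]
  apply List.filter_congr
  intro kv hkv
  unfold keepP
  congr 1
  rw [Bool.eq_iff_iff]
  simp only [PySem.Set.contains_iff, PySem.Set.mem_ofList, Bool.and_eq_true, decide_eq_true_eq]
  constructor
  · intro hmem
    have h := (mem_remove_iff tally seq_str kv.1).mp hmem
    exact ⟨h.2.1, h.2.2⟩
  · rintro ⟨h1, h2⟩
    exact (mem_remove_iff tally seq_str kv.1).mpr ⟨List.mem_map_of_mem hkv, h1, h2⟩

theorem condB_eq_condQ (d : PySem.Dict String Int) (k : String) :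
    (k != "" && k != pyRev k && d.contains (pyRev k)) = condQ d k := by
  simp only [condQ]
  cases k != "" <;> cases k != pyRev k <;> cases d.contains (pyRev k) <;> rfl

theorem condQ_rev (d : PySem.Dict String Int) (k : String)
    (hq : condQ d k = true) (hk : d.contains k = true) : condQ d (pyRev k) = true := by
  obtain ⟨hne, hcont, hrev⟩ := (condQ_iff _ _).mp hq
  rw [condQ_iff]
  exact ⟨pyRev_ne_empty hne, by rw [pyRev_pyRev]; exact hk,
    by rw [pyRev_pyRev]; exact fun h => hrev h.symm⟩

-- ---- B-side: the counting loop computes cntA for every pattern in the table ----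

-- s[:L] as a take, for 0 ≤ L
theorem sliceB_toList (s : String) (L : Int) (hL : 0 ≤ L) :
    (PySem.Str.slice s none (some L)).toList = s.toList.take L.toNat := by
  simp [PySem.Str.toList_slice, PySem.List.slice_to _ hL]

-- the bump condition for a fixed pattern p: it fires exactly at L = len p when s starts with p
theorem bump_iff (s p : String) (L : Int) (hL : 0 ≤ L) :
    (L ≤ PySem.Str.len s ∧ PySem.Str.slice s none (some L) = p)
      ↔ (L = PySem.Str.len p ∧ PySem.Str.startswith s p = true) := by
  have hlen : ∀ t : String, PySem.Str.len t = (t.toList.length : Int) := by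
    intro t; simp [PySem.Str.len_eq]
  constructor
  · rintro ⟨hle, hsl⟩
    have h1 : s.toList.take L.toNat = p.toList := by
      rw [← sliceB_toList s L hL, hsl]
    have hlen2 : L.toNat ≤ s.toList.length := by
      rw [hlen] at hle; omega
    have h3 : p.toList.length = L.toNat := by
      rw [← h1, List.length_take]; omega
    have hpre : p.toList <+: s.toList := by
      rw [← h1]; exact List.take_prefix _ _
    refine ⟨by rw [hlen]; omega, ?_⟩
    rw [PySem.Str.startswith_eq]
    exact (PySem.Chars.startswith_iff _ _).mpr hpre
  · rintro ⟨hLp, hsw⟩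
    rw [PySem.Str.startswith_eq] at hsw
    have hpre := (PySem.Chars.startswith_iff _ _).mp hsw
    have hle : p.toList.length ≤ s.toList.length := hpre.length_le
    have htake : p.toList = s.toList.take p.toList.length :=
      List.prefix_iff_eq_take.mp hpre
    subst hLp
    refine ⟨by rw [hlen, hlen]; omega, ?_⟩
    apply String.toList_injective
    rw [sliceB_toList _ _ hL, hlen, Int.toNat_natCast]
    exact htake.symm

-- contains is invariant through stepB
theorem contains_stepB (s : String) (c : PySem.Dict String Int) (L : Int) (x : String) :
    (stepB s c L).contains x = c.contains x := by
  unfold stepB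
  split_ifs with h
  · rw [PySem.Dict.contains_modify]
    by_cases hx : x = PySem.Str.slice s none (some L)
    · simp only [Bool.and_eq_true] at h
      simp [hx, h.2]
    · simp [hx]
  · rfl

-- contains is invariant through the whole counting loop
theorem contains_foldLens (s : String) (l : List Int) :
    ∀ (c : PySem.Dict String Int) x, (l.foldl (stepB s) c).contains x = c.contains x := by
  induction l with
  | nil => intro c x; rfl
  | cons L l ih => intro c x; rw [List.foldl_cons, ih, contains_stepB]

theorem contains_foldSeq (lens : List Int) (ss : List String) :
    ∀ (c : PySem.Dict String Int) x,
    (ss.foldl (fun c s => lens.foldl (stepB s) c) c).contains x = c.contains x := by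
  induction ss with
  | nil => intro c x; rfl
  | cons s ss ih => intro c x; rw [List.foldl_cons, ih, contains_foldLens]

-- the inner fold over a length list, tracked at one pattern p
theorem foldLens_getD (s p : String) (P : String → Bool) (hp : P p = true)
    (l : List Int) : ∀ (c : PySem.Dict String Int), (∀ L ∈ l, 0 ≤ L) →
    (∀ x, c.contains x = P x) →
    (l.foldl (stepB s) c).getD p 0
      = c.getD p 0 + (if PySem.Str.startswith s p then (l.count (PySem.Str.len p) : Int) else 0) := by
  induction l with
  | nil => intro c _ _; simp
  | cons L l ih =>
      intro c hpos hc
      have hL : 0 ≤ L := hpos L (List.mem_cons_self)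
      have hc' : ∀ x, (stepB s c L).contains x = P x := fun x => by
        rw [contains_stepB]; exact hc x
      rw [List.foldl_cons, ih (stepB s c L) (fun L' h => hpos L' (List.mem_cons_of_mem _ h)) hc']
      have hstep : (stepB s c L).getD p 0
          = c.getD p 0 + (if L = PySem.Str.len p ∧ PySem.Str.startswith s p = true then 1 else 0) := by
        unfold stepB
        split_ifs with h hb hb
        · simp only [Bool.and_eq_true, decide_eq_true_eq] at h
          rw [PySem.Dict.getD_modify]
          by_cases hx : p = PySem.Str.slice s none (some L)
          · simp [hx]
          · have : ¬ (L = PySem.Str.len p ∧ PySem.Str.startswith s p = true) := by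
              intro hcontra
              exact hx (((bump_iff s p L hL).mpr hcontra).2.symm)
            exact absurd hb this
        · simp only [Bool.and_eq_true, decide_eq_true_eq] at h
          rw [PySem.Dict.getD_modify]
          by_cases hx : p = PySem.Str.slice s none (some L)
          · exact absurd ((bump_iff s p L hL).mp ⟨h.1, hx.symm⟩) hb
          · simp [hx]
        · exfalso
          obtain ⟨hLp, hsw⟩ := hb
          have hiff := (bump_iff s p L hL).mpr ⟨hLp, hsw⟩
          apply h
          rw [hiff.2, hc, hp]
          have h1 : L ≤ (s.length : Int) := by simpa using hiff.1
          simp [h1]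
        · ring
      rw [hstep, List.count_cons]
      have hbeq : ((L == PySem.Str.len p) = true) ↔ (L = PySem.Str.len p) := beq_iff_eq
      by_cases hsw : PySem.Str.startswith s p = true
      · by_cases hLp : L = PySem.Str.len p
        · rw [if_pos ⟨hLp, hsw⟩, if_pos hsw, if_pos hsw, if_pos (hbeq.mpr hLp)]
          push_cast; ring
        · rw [if_neg (by tauto), if_pos hsw, if_pos hsw,
              if_neg (fun h' => hLp (hbeq.mp h'))]
          push_cast; ring
      · rw [if_neg (by tauto), if_neg hsw, if_neg hsw]
        ring

-- the outer fold over seq_str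
theorem foldSeq_getD (p : String) (P : String → Bool) (hp : P p = true)
    (lens : List Int) (hpos : ∀ L ∈ lens, 0 ≤ L) (hmem : (PySem.Str.len p) ∈ lens)
    (hnd : lens.Nodup) (ss : List String) :
    ∀ (c : PySem.Dict String Int), (∀ x, c.contains x = P x) →
    (ss.foldl (fun c s => lens.foldl (stepB s) c) c).getD p 0
      = c.getD p 0 + cntA ss p := by
  induction ss with
  | nil => intro c _; simp [cntA]
  | cons s ss ih =>
      intro c hc
      have hc' : ∀ x, (lens.foldl (stepB s) c).contains x = P x := fun x => by
        rw [contains_foldLens]; exact hc x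
      rw [List.foldl_cons, ih (lens.foldl (stepB s) c) hc',
          foldLens_getD s p P hp lens c hpos hc, List.count_eq_one_of_mem hnd hmem]
      simp only [cntA, List.map_cons, List.sum_cons]
      by_cases hsw : PySem.Str.startswith s p = true <;> simp [hsw] <;> ring

-- dict.fromkeys(l, 0): contains = membership, every stored value is 0
theorem fromkeys_contains (l : List String) :
    ∀ (c : PySem.Dict String Int) x,
    (l.foldl (fun c p => c.insert p 0) c).contains x = (c.contains x || l.contains x) := by
  induction l with
  | nil => intro c x; simp
  | cons a l ih =>
      intro c x
      rw [List.foldl_cons, ih, PySem.Dict.contains_insert]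
      by_cases hx : x = a
      · simp [hx]
      · have hb : (x == a) = false := beq_false_of_ne hx
        simp [hb, hx]

theorem fromkeys_getD (l : List String) :
    ∀ (c : PySem.Dict String Int) p, c.getD p 0 = 0 →
    (l.foldl (fun c p => c.insert p 0) c).getD p 0 = 0 := by
  induction l with
  | nil => intro c p h; simpa using h
  | cons a l ih =>
      intro c p h
      rw [List.foldl_cons]
      apply ih
      by_cases hp : p = a
      · rw [hp, PySem.Dict.getD_insert_self]
      · rw [PySem.Dict.getD_insert_of_ne _ _ _ hp, h]

theorem B_eq_filter (tally : List (String × Int)) (seq_str : List String)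
    (hpre : (tally.map Prod.fst).Nodup) :
    collapse_palindromic_keys_alt tally seq_str
      = tally.filter (keepP tally seq_str) := by
  unfold collapse_palindromic_keys_alt
  have hitems : (PySem.Dict.mk tally).items = tally := rfl
  have hkeys : (PySem.Dict.mk tally).keys = tally.map Prod.fst := rfl
  simp only [hitems]
  set d := PySem.Dict.mk tally with hd
  set pats : List String :=
    PySem.Set.ofList (d.keys.filter (fun k => k != "" && k != pyRev k && d.contains (pyRev k))) with hpats
  set lens : List Int := PySem.Set.ofList (pats.map (fun p => PySem.Str.len p)) with hlens
  set cnt0 : PySem.Dict String Int := pats.foldl (fun c p => c.insert p 0) PySem.Dict.empty with hcnt0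
  set cnt : PySem.Dict String Int := seq_str.foldl (fun c s => lens.foldl (stepB s) c) cnt0 with hcnt
  have hpats_mem : ∀ x, x ∈ pats ↔ (x ∈ tally.map Prod.fst ∧ condQ d x = true) := by
    intro x
    rw [hpats, PySem.Set.mem_ofList, List.mem_filter, condB_eq_condQ, hd]
    rfl
  have hP : ∀ x, cnt0.contains x = decide (x ∈ pats) := by
    intro x
    rw [hcnt0, fromkeys_contains pats PySem.Dict.empty x, PySem.Dict.contains_empty]
    simp [List.contains_iff_mem]
  have hlens_pos : ∀ L ∈ lens, 0 ≤ L := by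
    intro L hL
    rw [hlens, PySem.Set.mem_ofList, List.mem_map] at hL
    obtain ⟨p, _, hp⟩ := hL
    rw [← hp]
    simp [PySem.Str.len_eq]
  have hlens_nd : lens.Nodup := PySem.Set.nodup_ofList _
  have hcnt_contains : ∀ x, cnt.contains x = decide (x ∈ pats) := by
    intro x
    rw [hcnt, contains_foldSeq, hP]
  have hcnt_getD : ∀ p ∈ pats, cnt.getD p 0 = cntA seq_str p := by
    intro p hp
    have hmemlen : PySem.Str.len p ∈ lens := by
      rw [hlens, PySem.Set.mem_ofList]
      exact List.mem_map_of_mem hp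
    rw [hcnt, foldSeq_getD p (fun x => decide (x ∈ pats)) (by simpa using hp)
          lens hlens_pos hmemlen hlens_nd seq_str cnt0 hP,
        hcnt0, fromkeys_getD pats PySem.Dict.empty p (by rw [PySem.Dict.getD_eq_get?_getD]; rfl)]
    ring
  -- the trailing comprehension is a filter
  rw [foldl_if_skip,
      PySem.Dict.items_foldl_insert_fresh _ Prod.fst Prod.snd _
        (by intro a _; exact PySem.Dict.contains_empty a.1)
        (by exact hpre.sublist (List.filter_sublist.map Prod.fst))]
  simp only [show (PySem.Dict.empty : PySem.Dict String Int).items = [] from rfl, List.nil_append,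
    Prod.mk.eta, List.map_id, List.map_id']
  apply List.filter_congr
  intro kv hkv
  have hk1 : kv.1 ∈ tally.map Prod.fst := List.mem_map_of_mem hkv
  by_cases hq : condQ d kv.1 = true
  · have hkpats : kv.1 ∈ pats := (hpats_mem kv.1).mpr ⟨hk1, hq⟩
    have hkcont : d.contains kv.1 = true := by
      rw [hd, PySem.Dict.contains_iff_mem_keys, hkeys]
      exact hk1
    have hrevmem : pyRev kv.1 ∈ tally.map Prod.fst := by
      have := ((condQ_iff d kv.1).mp hq).2.1
      rw [hd, PySem.Dict.contains_iff_mem_keys, hkeys] at this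
      exact this
    have hrevpats : pyRev kv.1 ∈ pats :=
      (hpats_mem _).mpr ⟨hrevmem, condQ_rev d kv.1 hq hkcont⟩
    rw [hcnt_contains, hcnt_getD kv.1 hkpats, hcnt_getD _ hrevpats]
    unfold keepP
    rw [← hd]
    simp only [hkpats, decide_true, Bool.not_true, Bool.false_or, hq, Bool.true_and]
    by_cases hle : cntA seq_str kv.1 ≤ cntA seq_str (pyRev kv.1) <;> simp [hle] <;> omega
  · have hkpats : kv.1 ∉ pats := fun h => hq ((hpats_mem kv.1).mp h).2
    rw [hcnt_contains]
    unfold keepP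
    rw [← hd]
    simp [hkpats, hq]

-- ===== VERDICT (by name: the statement is the Claim_ definition above) =====
theorem collapse_palindromic_keys_spec : Claim_equal_collapse_palindromic_keys := by
  intro tally seq_str _ hpre
  unfold Spec_collapse_palindromic_keys
  rw [A_eq_filter _ _ hpre, B_eq_filter _ _ hpre]
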